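-- pv_equiv track=rewrite | github.com/carbonol/GeneradorEjercicios | CodeAssembler/print_combinations_list.py | get_possible_variants_list
-- ===== SOURCE A (Python) =====
-- def add_elemts_to_list(lst, elemts_list):
--     if type(elemts_list) != list:
--         raise TypeError('El parámetro elemts_list en la función add_elemts_to_list no es de tipo list')
--     if type(lst) != list:
--         raise TypeError('El parámetro lst en la función add_elemts_to_list no es de tipo list')
--
--     num_elemts_list = len(elemts_list)
--     if (len(lst) == 0):
--         for i in range(0, num_elemts_list, 1):
--             inner_list = []
--             inner_list.append(elemts_list[i])
--             lst.append(inner_list)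
--         return lst
--     else:
--         new_list = []
--         num_indexes_list = len(lst)
--         for i in range(0, num_indexes_list, 1):
--             num_indexes_sublist = len(lst[i])
--
--             sublist_element = []
--             for j in range(0, num_indexes_sublist, 1):
--                 sublist_element.append(lst[i][j])
--
--
--             for k in range(0, num_elemts_list, 1):
--                 inner_sublist_element = sublist_element.copy()
--                 inner_sublist_element.append(elemts_list[k])
--                 new_list.append(inner_sublist_element)
--
--         lst = new_list
--         return lst
--
-- def get_subroutine_possible_variants_list(subroutine_index, variant_count_per_subroutine_list): # OK
--     if type(subroutine_index) != int:
--         raise TypeError('El parámetro subroutine_index en la función get_subroutine_possible_variants_list no es de tipo int')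
--     if type(variant_count_per_subroutine_list) != list:
--         raise TypeError('El parámetro variant_count_per_subroutine_list en la función get_subroutine_possible_variants_list no es de tipo list')
--
--     num_variants = variant_count_per_subroutine_list[subroutine_index]
--     lst = []
--     for i in range(1, num_variants + 1, 1):
--         lst.append(i)
--     return lst
--
-- def get_possible_variants_list(num_subroutines, variant_count_per_subroutine_list):
--     if type(num_subroutines) != int:
--         raise TypeError('El parámetro num_subroutines en la función get_possible_variants_list no es de tipo int')
--     if type(variant_count_per_subroutine_list) != list:
--         raise TypeError('El parámetro variant_count_per_subroutine_list en la función get_possible_variants_list no es de tipo list')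
--
--     lst = []
--     for i in range(0, num_subroutines, 1):
--         subroutine_possible_variants_list = get_subroutine_possible_variants_list(i, variant_count_per_subroutine_list)
--         lst = add_elemts_to_list(lst, subroutine_possible_variants_list)
--     return lst
-- ===== SOURCE B (Python) =====
-- def get_possible_variants_list(num_subroutines, variant_count_per_subroutine_list):
--     if num_subroutines <= 0:
--         return []
--     counts = variant_count_per_subroutine_list[:num_subroutines]
--     total = 1
--     for c in counts:
--         total *= max(c, 0)
--     result = []
--     for idx in range(total):
--         combo = []
--         rem = idx
--         for c in reversed(counts):
--             rem, d = divmod(rem, c)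
--             combo.insert(0, d + 1)
--         result.append(combo)
--     return result
-- ===== Notes on version B (the rewrite author's own statement) =====
-- stated objective: alternative
-- what changed: B replaces A's repeated extend-every-prefix passes by rank decoding: it computes the total number of combinations as a product and reconstructs the k-th combination for each k by mixed-radix divmod, never materialising intermediate prefix lists.
-- intended difference: On inputs where some subroutine i < num_subroutines-1 has a nonpositive variant count while every later subroutine's count is positive, A returns the product of the suffix after i (its empty-accumulator branch 'restarts'), whereas B returns [], the empty product, which is the intended value since a subroutine with no variants admits no combination. — e.g. on get_possible_variants_list(2, [0, 2]): A returns [[1], [2]], B returns []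
import Mathlib
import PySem

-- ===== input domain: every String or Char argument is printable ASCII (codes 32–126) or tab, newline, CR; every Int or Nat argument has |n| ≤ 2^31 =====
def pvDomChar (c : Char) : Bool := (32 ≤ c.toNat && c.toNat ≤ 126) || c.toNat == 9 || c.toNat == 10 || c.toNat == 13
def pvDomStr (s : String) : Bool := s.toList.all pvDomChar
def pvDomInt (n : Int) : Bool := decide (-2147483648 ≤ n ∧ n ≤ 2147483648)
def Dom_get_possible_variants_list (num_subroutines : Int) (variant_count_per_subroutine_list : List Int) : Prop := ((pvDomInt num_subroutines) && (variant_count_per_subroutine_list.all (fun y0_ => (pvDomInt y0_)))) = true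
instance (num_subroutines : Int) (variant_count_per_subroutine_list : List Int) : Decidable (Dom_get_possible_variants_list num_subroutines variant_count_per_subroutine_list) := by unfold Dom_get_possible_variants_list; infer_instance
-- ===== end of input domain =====

-- B replaces A's extend-every-prefix passes by rank decoding: total = product of the counts,
-- then each combination is reconstructed from its rank by mixed-radix divmod (objective: alternative).
-- Note: A mutates no argument observably (it rebinds local names only).

-- ===== PORT A =====
-- All list indices reached inside these loops are in range, so xs[i] is ported as pyGetD;
-- the one indexing that can raise (variant_count_per_subroutine_list[i]) is covered by Pre_.
def add_elemts_to_list (lst : List (List Int)) (elemts_list : List Int) : List (List Int) :=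
  let num_elemts_list : Int := PySem.List.len elemts_list
  if PySem.List.len lst = 0 then
    (PySem.List.pyRange 0 num_elemts_list 1).foldl
      (fun l i => l ++ [[PySem.List.pyGetD elemts_list i 0]]) lst
  else
    let new_list : List (List Int) :=
      (PySem.List.pyRange 0 (PySem.List.len lst) 1).foldl (fun nl i =>
        let sub := PySem.List.pyGetD lst i []
        let sublist_element :=
          (PySem.List.pyRange 0 (PySem.List.len sub) 1).foldl
            (fun s j => s ++ [PySem.List.pyGetD sub j 0]) []
        (PySem.List.pyRange 0 num_elemts_list 1).foldl
          (fun nl2 k => nl2 ++ [sublist_element ++ [PySem.List.pyGetD elemts_list k 0]]) nl) []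
    new_list

def get_subroutine_possible_variants_list (subroutine_index : Int) (variant_count_per_subroutine_list : List Int) : List Int :=
  let num_variants := PySem.List.pyGetD variant_count_per_subroutine_list subroutine_index 0
  (PySem.List.pyRange 1 (num_variants + 1) 1).foldl (fun l i => l ++ [i]) []

def get_possible_variants_list (num_subroutines : Int) (variant_count_per_subroutine_list : List Int) : List (List Int) :=
  (PySem.List.pyRange 0 num_subroutines 1).foldl
    (fun lst i => add_elemts_to_list lst (get_subroutine_possible_variants_list i variant_count_per_subroutine_list)) []

-- ===== PORT B =====
-- B-side helper: the inner decode loop of Source B ('for c in reversed(counts): rem, d = divmod(rem, c);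
-- combo.insert(0, d+1)'); state = (rem, combo), insert(0,·) is a cons. divmod is ported as
-- floordiv/mod, exact wherever the loop runs (total > 0 forces every c ≥ 1 there).
def pvDecode (counts : List Int) (idx : Int) : Int × List Int :=
  counts.reverse.foldl
    (fun p c => (PySem.Int.floordiv p.1 c, (PySem.Int.mod p.1 c + 1) :: p.2)) (idx, [])

def get_possible_variants_list_alt (num_subroutines : Int) (variant_count_per_subroutine_list : List Int) : List (List Int) :=
  if num_subroutines ≤ 0 then []
  else
    let counts := PySem.List.slice variant_count_per_subroutine_list (some 0) (some num_subroutines)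
    let total := counts.foldl (fun t c => t * max c 0) 1
    (PySem.List.pyRange 0 total 1).foldl (fun res idx => res ++ [(pvDecode counts idx).2]) []

-- ===== PRECONDITION & SPEC =====
-- Pre_ excludes exactly the inputs where Python A raises IndexError:
-- num_subroutines exceeding the length of the count list.
def Pre_get_possible_variants_list (num_subroutines : Int) (variant_count_per_subroutine_list : List Int) : Prop :=
  num_subroutines ≤ (variant_count_per_subroutine_list.length : Int)
instance (num_subroutines : Int) (variant_count_per_subroutine_list : List Int) : Decidable (Pre_get_possible_variants_list num_subroutines variant_count_per_subroutine_list) := by unfold Pre_get_possible_variants_list; infer_instance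

def pvWitness_get_possible_variants_list : Int × List Int := (2, [2, 2])

-- On inputs where some subroutine i < num_subroutines-1 has a nonpositive variant count while every
-- later subroutine's count is positive, A returns the product of the suffix after i (its
-- empty-accumulator branch "restarts"), whereas B returns [], the empty product, which is the
-- intended value since a subroutine with no variants admits no combination.
def D_get_possible_variants_list (num_subroutines : Int) (variant_count_per_subroutine_list : List Int) : Prop :=
  ∃ i ∈ List.range (min (num_subroutines - 1).toNat variant_count_per_subroutine_list.length),
    variant_count_per_subroutine_list.getD i 0 ≤ 0 ∧
    ∀ j ∈ List.range (min num_subroutines.toNat variant_count_per_subroutine_list.length),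
      i < j → 1 ≤ variant_count_per_subroutine_list.getD j 0
instance (num_subroutines : Int) (variant_count_per_subroutine_list : List Int) : Decidable (D_get_possible_variants_list num_subroutines variant_count_per_subroutine_list) := by unfold D_get_possible_variants_list; infer_instance

def Spec_get_possible_variants_list (num_subroutines : Int) (variant_count_per_subroutine_list : List Int) (out : List (List Int)) : Prop := ¬ D_get_possible_variants_list num_subroutines variant_count_per_subroutine_list → out = get_possible_variants_list_alt num_subroutines variant_count_per_subroutine_list
instance (num_subroutines : Int) (variant_count_per_subroutine_list : List Int) (out : List (List Int)) : Decidable (Spec_get_possible_variants_list num_subroutines variant_count_per_subroutine_list out) := by unfold Spec_get_possible_variants_list; infer_instance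

def pvDiffWitness_get_possible_variants_list : Int × List Int := (2, [0, 2])
def pvDiffWitnessOut_get_possible_variants_list : (List (List Int)) × (List (List Int)) := ([[1], [2]], [])

-- ===== CLAIM (what is proved, stated in full; the proofs are below) =====
def Claim_unchanged_get_possible_variants_list : Prop := ∀ (num_subroutines : Int) (variant_count_per_subroutine_list : List Int), Dom_get_possible_variants_list num_subroutines variant_count_per_subroutine_list → Pre_get_possible_variants_list num_subroutines variant_count_per_subroutine_list → Spec_get_possible_variants_list num_subroutines variant_count_per_subroutine_list (get_possible_variants_list num_subroutines variant_count_per_subroutine_list)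
def Claim_changed_get_possible_variants_list : Prop := Dom_get_possible_variants_list (pvDiffWitness_get_possible_variants_list.1) (pvDiffWitness_get_possible_variants_list.2) ∧ Pre_get_possible_variants_list (pvDiffWitness_get_possible_variants_list.1) (pvDiffWitness_get_possible_variants_list.2) ∧ D_get_possible_variants_list (pvDiffWitness_get_possible_variants_list.1) (pvDiffWitness_get_possible_variants_list.2) ∧ get_possible_variants_list (pvDiffWitness_get_possible_variants_list.1) (pvDiffWitness_get_possible_variants_list.2) = pvDiffWitnessOut_get_possible_variants_list.1 ∧ get_possible_variants_list_alt (pvDiffWitness_get_possible_variants_list.1) (pvDiffWitness_get_possible_variants_list.2) = pvDiffWitnessOut_get_possible_variants_list.2 ∧ pvDiffWitnessOut_get_possible_variants_list.1 ≠ pvDiffWitnessOut_get_possible_variants_list.2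
def Claim_exact_get_possible_variants_list : Prop := ∀ (num_subroutines : Int) (variant_count_per_subroutine_list : List Int), Dom_get_possible_variants_list num_subroutines variant_count_per_subroutine_list → Pre_get_possible_variants_list num_subroutines variant_count_per_subroutine_list → D_get_possible_variants_list num_subroutines variant_count_per_subroutine_list → get_possible_variants_list num_subroutines variant_count_per_subroutine_list ≠ get_possible_variants_list_alt num_subroutines variant_count_per_subroutine_list

-- ===== LEMMAS AND PROOFS =====

-- A's per-subroutine step, as add_elemts_to_list computes it.
def stepA (lst : List (List Int)) (el : List Int) : List (List Int) :=
  if lst = [] then el.map (fun e => [e]) else lst.flatMap (fun s => el.map (fun e => s ++ [e]))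

-- the non-restarting Cartesian step
def stepB (lst : List (List Int)) (el : List Int) : List (List Int) :=
  lst.flatMap (fun s => el.map (fun e => s ++ [e]))

-- range(1, c+1), the variant list of one subroutine.
def range1 (c : Int) : List Int := PySem.List.pyRange 1 (c + 1) 1

-- the list of per-subroutine variant lists
def factors (n : Int) (L : List Int) : List (List Int) :=
  (PySem.List.pyRange 0 n 1).map (fun i => range1 (PySem.List.pyGetD L i 0))

-- suffix-recursive Cartesian product (prefix extension), used to bridge B to the stepB fold
def prodList (F : List (List Int)) : List (List Int) :=
  F.foldr (fun el acc => el.flatMap (fun e => acc.map (fun t => e :: t))) [[]]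

-- B's total, as a named function of the truncated count list
def prodP (cs : List Int) : Int := cs.foldl (fun t c => t * max c 0) 1

theorem inner1 (sub : List Int) :
    (PySem.List.pyRange 0 (PySem.List.len sub) 1).foldl (fun s j => s ++ [PySem.List.pyGetD sub j 0]) [] = sub := by
  rw [PySem.List.foldl_pyRange_zero_pyGetD sub 0 (fun acc x => acc ++ [x]) []]
  rw [PySem.List.foldl_append_singleton_eq_self]; simp

theorem inner2 (el se : List Int) (nl : List (List Int)) :
    (PySem.List.pyRange 0 (PySem.List.len el) 1).foldl
      (fun nl2 k => nl2 ++ [se ++ [PySem.List.pyGetD el k 0]]) nl = nl ++ el.map (fun e => se ++ [e]) := by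
  rw [PySem.List.foldl_pyRange_zero_pyGetD el 0 (fun acc x => acc ++ [se ++ [x]]) nl]
  rw [PySem.List.foldl_append_singleton_eq_map]

theorem add_eq (lst : List (List Int)) (el : List Int) :
    add_elemts_to_list lst el = stepA lst el := by
  unfold add_elemts_to_list stepA
  dsimp only
  by_cases h : lst = []
  · subst h
    rw [if_pos (by simp), if_pos rfl]
    rw [PySem.List.foldl_pyRange_zero_pyGetD el 0 (fun acc x => acc ++ [[x]]) []]
    rw [PySem.List.foldl_append_singleton_eq_map]
    simp
  · rw [if_neg (by simpa [PySem.List.len_eq] using h), if_neg h]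
    simp only [inner1, inner2]
    rw [PySem.List.foldl_pyRange_zero_pyGetD lst [] (fun nl sub => nl ++ el.map (fun e => sub ++ [e])) []]
    rw [PySem.List.foldl_append_eq_flatMap]; simp

theorem sub_eq (i : Int) (L : List Int) :
    get_subroutine_possible_variants_list i L = range1 (PySem.List.pyGetD L i 0) := by
  unfold get_subroutine_possible_variants_list range1
  rw [PySem.List.foldl_append_singleton_eq_self]
  simp

theorem A_eq (n : Int) (L : List Int) :
    get_possible_variants_list n L = (factors n L).foldl stepA [] := by
  unfold get_possible_variants_list factors
  rw [List.foldl_map]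
  simp only [add_eq, sub_eq]

-- ---- B-side characterisation: rank decoding enumerates the product ----

theorem pvDecode_cons (c : Int) (cs : List Int) (idx : Int) :
    pvDecode (c :: cs) idx =
      (PySem.Int.floordiv (pvDecode cs idx).1 c,
       (PySem.Int.mod (pvDecode cs idx).1 c + 1) :: (pvDecode cs idx).2) := by
  simp [pvDecode, List.foldl_append]

theorem prodP_foldl (cs : List Int) (a : Int) :
    cs.foldl (fun t c => t * max c 0) a = a * prodP cs := by
  induction cs generalizing a with
  | nil => simp [prodP]
  | cons c cs ih =>
    simp only [prodP, List.foldl_cons] at *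
    rw [ih, ih (1 * max c 0)]
    ring

theorem prodP_cons (c : Int) (cs : List Int) : prodP (c :: cs) = max c 0 * prodP cs := by
  have h : prodP (c :: cs) = cs.foldl (fun t c => t * max c 0) (1 * max c 0) := rfl
  rw [h, prodP_foldl]
  ring

theorem prodP_pos (cs : List Int) (h : ∀ c ∈ cs, 1 ≤ c) : 1 ≤ prodP cs := by
  induction cs with
  | nil => simp [prodP]
  | cons c cs ih =>
    rw [prodP_cons]
    have hc : 1 ≤ c := h c List.mem_cons_self
    have : 1 ≤ prodP cs := ih (fun x hx => h x (List.mem_cons_of_mem _ hx))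
    nlinarith [le_max_right c (0:Int), le_max_left c (0:Int)]

theorem prodP_zero (cs : List Int) (h : ∃ c ∈ cs, c ≤ 0) : prodP cs = 0 := by
  induction cs with
  | nil => simp at h
  | cons c cs ih =>
    rw [prodP_cons]
    obtain ⟨x, hx, hx0⟩ := h
    rcases List.mem_cons.mp hx with rfl | hmem
    · rw [max_eq_right hx0]; ring
    · rw [ih ⟨x, hmem, hx0⟩]; ring

-- mixed-radix digit extraction: the quotient passes through, digits only see the remainder
theorem decode_split (cs : List Int) (h : ∀ c ∈ cs, 1 ≤ c) :
    ∀ q r : Int, 0 ≤ q → 0 ≤ r → r < prodP cs →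
      pvDecode cs (q * prodP cs + r) = (q, (pvDecode cs r).2) := by
  induction cs with
  | nil =>
    intro q r _ hr hrlt
    simp only [prodP, List.foldl_nil] at hrlt
    have : r = 0 := by omega
    subst this
    simp [pvDecode, prodP]
  | cons c cs ih =>
    intro q r hq hr hrlt
    have hc : 1 ≤ c := h c List.mem_cons_self
    have hcs : ∀ x ∈ cs, 1 ≤ x := fun x hx => h x (List.mem_cons_of_mem _ hx)
    have hT : 1 ≤ prodP cs := prodP_pos cs hcs
    rw [prodP_cons, max_eq_left (by omega)] at hrlt
    set T := prodP cs with hTdef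
    -- split r into r1 * T + r0
    have hT0 : 0 < T := by omega
    set r1 := PySem.Int.floordiv r T with hr1def
    set r0 := PySem.Int.mod r T with hr0def
    have hr0n : 0 ≤ r0 := PySem.Int.mod_nonneg r hT0
    have hr0lt : r0 < T := PySem.Int.mod_lt r hT0
    have hsplit : r1 * T + r0 = r := PySem.Int.floordiv_mul_add_mod r T
    have hr1n : 0 ≤ r1 := by nlinarith
    have hr1lt : r1 < c := by nlinarith
    have h1 : pvDecode cs ((q * c + r1) * T + r0) = (q * c + r1, (pvDecode cs r0).2) :=
      ih hcs (q * c + r1) r0 (by nlinarith) hr0n hr0lt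
    have h2 : pvDecode cs (r1 * T + r0) = (r1, (pvDecode cs r0).2) :=
      ih hcs r1 r0 hr1n hr0n hr0lt
    have harg : q * (prodP (c :: cs)) + r = (q * c + r1) * T + r0 := by
      rw [prodP_cons, max_eq_left (by omega), ← hTdef]
      nlinarith [hsplit]
    rw [harg, pvDecode_cons, h1]
    rw [show r = r1 * T + r0 from hsplit.symm, pvDecode_cons, h2]
    have hfd1 : PySem.Int.floordiv (q * c + r1) c = q := by
      rw [PySem.Int.floordiv_eq_iff_of_pos (by omega)]
      constructor <;> nlinarith
    have hmd1 : PySem.Int.mod (q * c + r1) c = r1 := by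
      have := PySem.Int.floordiv_mul_add_mod (q * c + r1) c
      rw [hfd1] at this
      omega
    have hfd2 : PySem.Int.floordiv r1 c = 0 := by
      rw [PySem.Int.floordiv_eq_iff_of_pos (by omega)]
      constructor <;> nlinarith
    have hmd2 : PySem.Int.mod r1 c = r1 := by
      have := PySem.Int.floordiv_mul_add_mod r1 c
      rw [hfd2] at this
      omega
    simp [hfd1, hmd1, hmd2]

theorem prodList_cons (el : List Int) (F : List (List Int)) :
    prodList (el :: F) = el.flatMap (fun e => (prodList F).map (fun t => e :: t)) := rfl

-- one block per leading digit: decoding range(0, k*T) yields digits 1..k each followed by the tail product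
theorem enum_blocks (c : Int) (cs : List Int) (h : ∀ x ∈ cs, 1 ≤ x) (hc : 1 ≤ c) :
    ∀ k : Nat, (k : Int) ≤ c →
      (PySem.List.pyRange 0 ((k : Int) * prodP cs) 1).map (fun idx => (pvDecode (c :: cs) idx).2)
        = (PySem.List.pyRange 1 ((k : Int) + 1) 1).flatMap
            (fun e => (PySem.List.pyRange 0 (prodP cs) 1).map (fun r => e :: (pvDecode cs r).2)) := by
  have hT : 1 ≤ prodP cs := prodP_pos cs h
  intro k
  induction k with
  | zero =>
    intro _
    rw [PySem.List.pyRange_one_eq_nil (show ((0 : Nat) : Int) * prodP cs ≤ 0 by simp),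
        PySem.List.pyRange_one_eq_nil (show ((0 : Nat) : Int) + 1 ≤ 1 by simp)]
    simp
  | succ k ih =>
    intro hkc
    push_cast at hkc
    have hk' : (k : Int) ≤ c := by omega
    have hklt : (k : Int) < c := by omega
    have hk0 : (0 : Int) ≤ (k : Int) := Int.natCast_nonneg k
    rw [show (((k + 1 : Nat)) : Int) = (k : Int) + 1 by push_cast; ring]
    rw [PySem.List.pyRange_one_succ_right (show (1 : Int) ≤ (k : Int) + 1 by omega),
        List.flatMap_append]
    rw [PySem.List.pyRange_one_append 0 ((k : Int) * prodP cs) (((k : Int) + 1) * prodP cs)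
        (by positivity) (by nlinarith), List.map_append, ih hk']
    congr 1
    -- last block: indices k*T + r, r ∈ range(0,T)
    have hshift : PySem.List.pyRange ((k : Int) * prodP cs) (((k : Int) + 1) * prodP cs) 1
        = (PySem.List.pyRange 0 (prodP cs) 1).map (fun r => (k : Int) * prodP cs + r) := by
      rw [PySem.List.pyRange_one, PySem.List.pyRange_one]
      simp only [sub_zero]
      rw [show ((k : Int) + 1) * prodP cs - (k : Int) * prodP cs = prodP cs by ring]
      rw [List.map_map]
      apply List.map_congr_left
      intro x _
      simp
    rw [hshift, List.map_map]
    simp only [List.flatMap_cons, List.flatMap_nil, List.append_nil]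
    apply List.map_congr_left
    intro r hr
    rw [PySem.List.mem_pyRange_one] at hr
    have hsp := decode_split cs h (k : Int) r hk0 hr.1 hr.2
    have hfd : PySem.Int.floordiv (k : Int) c = 0 := by
      rw [PySem.Int.floordiv_eq_iff_of_pos (by omega)]
      constructor <;> nlinarith
    have hmd : PySem.Int.mod (k : Int) c = (k : Int) := by
      have := PySem.Int.floordiv_mul_add_mod (k : Int) c
      rw [hfd] at this
      omega
    simp [Function.comp, pvDecode_cons, hsp, hfd, hmd]

theorem enum (cs : List Int) (h : ∀ c ∈ cs, 1 ≤ c) :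
    (PySem.List.pyRange 0 (prodP cs) 1).map (fun idx => (pvDecode cs idx).2)
      = prodList (cs.map range1) := by
  induction cs with
  | nil =>
    simp only [prodP, List.foldl_nil, List.map_nil]
    rw [show PySem.List.pyRange 0 1 1 = [0] from rfl]
    simp [pvDecode, prodList]
  | cons c cs ih =>
    have hc : 1 ≤ c := h c List.mem_cons_self
    have hcs : ∀ x ∈ cs, 1 ≤ x := fun x hx => h x (List.mem_cons_of_mem _ hx)
    have hck : ((c.toNat : Nat) : Int) = c := Int.toNat_of_nonneg (by omega)
    have := enum_blocks c cs hcs hc c.toNat (by omega)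
    rw [hck] at this
    rw [prodP_cons, max_eq_left (by omega), List.map_cons, prodList_cons]
    rw [this]
    rw [← range1]
    congr 1
    funext e
    rw [← ih hcs, List.map_map]
    rfl

theorem foldB_prodList (F : List (List Int)) :
    ∀ init : List (List Int), F.foldl stepB init = init.flatMap (fun s => (prodList F).map (fun t => s ++ t)) := by
  induction F with
  | nil =>
    intro init
    simp [prodList]
  | cons el F ih =>
    intro init
    simp only [List.foldl_cons, ih, prodList_cons, stepB]
    rw [List.flatMap_assoc]
    congr 1
    funext s
    rw [List.map_flatMap, List.flatMap_map]
    congr 1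
    funext e
    rw [List.map_map]
    congr 1
    funext t
    simp

theorem foldB_eq_prodList (F : List (List Int)) : F.foldl stepB [[]] = prodList F := by
  rw [foldB_prodList]
  simp

theorem prodList_nil_of_mem (F : List (List Int)) (h : [] ∈ F) : prodList F = [] := by
  induction F with
  | nil => simp at h
  | cons el F ih =>
    rw [prodList_cons]
    rcases List.mem_cons.mp h with hel | hmem
    · rw [← hel]; simp
    · rw [ih hmem]; simp

theorem length_range1 (c : Int) : (range1 c).length = c.toNat := by
  simp [range1, PySem.List.length_pyRange_one]

theorem range1_eq_nil_iff (c : Int) : range1 c = [] ↔ c ≤ 0 := by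
  rw [← List.length_eq_zero_iff, length_range1]; omega

theorem factors_length (n : Int) (L : List Int) : (factors n L).length = n.toNat := by
  simp [factors, PySem.List.length_pyRange_one]

theorem factors_getElem (n : Int) (L : List Int) (k : Nat) (hk : k < (factors n L).length) :
    (factors n L)[k] = range1 (L.getD k 0) := by
  simp [factors, PySem.List.getElem_pyRange_one]

theorem factors_eq_map (n : Int) (L : List Int) (hn : 0 < n) (hpre : n ≤ (L.length : Int)) :
    factors n L = (L.take n.toNat).map range1 := by
  apply List.ext_getElem
  · rw [factors_length, List.length_map, List.length_take]
    omega
  · intro k hk1 hk2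
    rw [factors_getElem]
    rw [List.getElem_map, List.getElem_take]
    congr 1
    rw [List.length_map, List.length_take] at hk2
    rw [List.getD_eq_getElem _ _ (by omega)]

theorem B_eq (n : Int) (L : List Int) (hpre : n ≤ (L.length : Int)) :
    get_possible_variants_list_alt n L = if n ≤ 0 then [] else (factors n L).foldl stepB [[]] := by
  unfold get_possible_variants_list_alt
  rcases em (n ≤ 0) with h | h
  · rw [if_pos h, if_pos h]
  · rw [if_neg h, if_neg h]
    have hn : 0 < n := by omega
    have hslice : PySem.List.slice L (some 0) (some n) = L.take n.toNat := by
      rw [show (0 : Int) = ((0 : Nat) : Int) by norm_num,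
          show n = ((n.toNat : Nat) : Int) by omega,
          PySem.List.slice_natCast]
      simp
      omega
    simp only [hslice]
    rw [PySem.List.foldl_append_singleton_eq_map]
    rw [show (L.take n.toNat).foldl (fun t c => t * max c 0) 1 = prodP (L.take n.toNat) from rfl]
    rw [factors_eq_map n L hn hpre, foldB_eq_prodList]
    simp only [List.nil_append]
    by_cases hall : ∀ c ∈ L.take n.toNat, 1 ≤ c
    · exact enum _ hall
    · push Not at hall
      obtain ⟨c, hcm, hc0⟩ := hall
      rw [prodP_zero _ ⟨c, hcm, by omega⟩]
      rw [PySem.List.pyRange_one_eq_nil (by norm_num)]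
      rw [prodList_nil_of_mem]
      · simp
      · rw [List.mem_map]
        exact ⟨c, hcm, (range1_eq_nil_iff c).mpr (by omega)⟩

theorem stepA_nil_right (lst : List (List Int)) : stepA lst [] = [] := by
  unfold stepA; split <;> simp

theorem stepB_nil_right (lst : List (List Int)) : stepB lst [] = [] := by
  simp [stepB]

theorem stepA_nil_left (el : List Int) : stepA [] el = stepB [[]] el := by
  simp [stepA, stepB]

theorem stepB_ne_nil {lst : List (List Int)} {el : List Int} (h1 : lst ≠ []) (h2 : el ≠ []) :
    stepB lst el ≠ [] := by
  cases lst with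
  | nil => exact absurd rfl h1
  | cons s t =>
    simp only [stepB, List.flatMap_cons]
    intro hc
    rw [List.append_eq_nil_iff] at hc
    exact h2 (by simpa using hc.1)

theorem fold_eq (F : List (List Int)) (hF : ∀ el ∈ F, el ≠ []) :
    ∀ lst, lst ≠ [] → F.foldl stepA lst = F.foldl stepB lst := by
  induction F with
  | nil => intro lst _; rfl
  | cons el F ih =>
    intro lst hlst
    have hel : el ≠ [] := hF el List.mem_cons_self
    have hstep : stepA lst el = stepB lst el := by simp [stepA, stepB, hlst]
    simp only [List.foldl_cons, hstep]
    exact ih (fun x hx => hF x (List.mem_cons_of_mem _ hx)) _ (stepB_ne_nil hlst hel)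

theorem foldB_nil (F : List (List Int)) : F.foldl stepB [] = [] := by
  induction F with
  | nil => rfl
  | cons el F ih => simpa [stepB] using ih

theorem foldA_ne_nil (F : List (List Int)) (hF : ∀ el ∈ F, el ≠ []) :
    ∀ lst, lst ≠ [] → F.foldl stepA lst ≠ [] := by
  induction F with
  | nil => intro lst h; simpa using h
  | cons el F ih =>
    intro lst hlst
    have hel : el ≠ [] := hF el List.mem_cons_self
    have hstep : stepA lst el = stepB lst el := by simp [stepA, stepB, hlst]
    simp only [List.foldl_cons, hstep]
    exact ih (fun x hx => hF x (List.mem_cons_of_mem _ hx)) _ (stepB_ne_nil hlst hel)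

theorem take_cons_drop (F : List (List Int)) (j : Nat) (hj : j < F.length) (hFj : F[j] = []) :
    F = F.take j ++ [] :: F.drop (j+1) := by
  conv_lhs => rw [← List.take_append_drop j F, ← List.getElem_cons_drop hj, hFj]

-- ===== VERDICT (by name: the statement is the Claim_ definition above) =====
theorem get_possible_variants_list_spec : Claim_unchanged_get_possible_variants_list := by
  unfold Claim_unchanged_get_possible_variants_list
  intro n L _ hpre
  unfold Pre_get_possible_variants_list at hpre
  unfold Spec_get_possible_variants_list
  intro hD
  rw [A_eq, B_eq n L hpre]
  by_cases hn : n ≤ 0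
  · rw [if_pos hn]
    have hnil : factors n L = [] := by
      rw [← List.length_eq_zero_iff, factors_length]; omega
    rw [hnil]; rfl
  · rw [if_neg hn]
    have hlen : (factors n L).length = n.toNat := factors_length n L
    by_cases hE : ∃ el ∈ factors n L, el = []
    · obtain ⟨el0, hmem, hel0⟩ := hE
      obtain ⟨j0, hj0lt, hj0⟩ := List.getElem_of_mem hmem
      have hP0 : (factors n L).getD j0 [1] = [] := by
        rw [List.getD_eq_getElem _ _ hj0lt, hj0, hel0]
      have hPj : (factors n L).getD
          (Nat.findGreatest (fun k => (factors n L).getD k [1] = []) (factors n L).length) [1] = [] :=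
        Nat.findGreatest_spec (P := fun k => (factors n L).getD k [1] = []) (le_of_lt hj0lt) hP0
      have hjlt : Nat.findGreatest (fun k => (factors n L).getD k [1] = []) (factors n L).length
          < (factors n L).length := by
        by_contra hge
        rw [List.getD_eq_default] at hPj
        · exact absurd hPj (by simp)
        · omega
      have hFj : (factors n L)[Nat.findGreatest (fun k => (factors n L).getD k [1] = [])
          (factors n L).length]'hjlt = [] := by
        rwa [List.getD_eq_getElem _ _ hjlt] at hPj
      rcases Nat.lt_or_ge
          (Nat.findGreatest (fun k => (factors n L).getD k [1] = []) (factors n L).length + 1)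
          (factors n L).length with hjlt2 | hjge
      · exfalso
        apply hD
        unfold D_get_possible_variants_list
        refine ⟨Nat.findGreatest (fun k => (factors n L).getD k [1] = []) (factors n L).length,
          by rw [List.mem_range]; omega, ?_, ?_⟩
        · have hgj := (factors_getElem n L _ hjlt).symm.trans hFj
          exact (range1_eq_nil_iff _).mp hgj
        · intro k hk hltk
          rw [List.mem_range] at hk
          have hkF : k < (factors n L).length := by omega
          have hnP : ¬ (fun k => (factors n L).getD k [1] = []) k :=
            Nat.findGreatest_is_greatest (by omega) (le_of_lt hkF)
          simp only at hnP
          rw [List.getD_eq_getElem _ _ hkF, factors_getElem n L k hkF] at hnP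
          by_contra hle
          exact hnP ((range1_eq_nil_iff _).mpr (by omega))
      · have hsplit := take_cons_drop (factors n L) _ hjlt hFj
        have hdrop : (factors n L).drop
            (Nat.findGreatest (fun k => (factors n L).getD k [1] = []) (factors n L).length + 1) = [] :=
          List.drop_eq_nil_of_le (by omega)
        rw [hdrop] at hsplit
        have hAv : (factors n L).foldl stepA [] = [] := by
          conv_lhs => rw [hsplit]
          rw [List.foldl_append]
          simp only [List.foldl_cons, List.foldl_nil]
          exact stepA_nil_right _
        have hBv : (factors n L).foldl stepB [[]] = [] := by
          conv_lhs => rw [hsplit]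
          rw [List.foldl_append]
          simp only [List.foldl_cons, List.foldl_nil]
          exact stepB_nil_right _
        rw [hAv, hBv]
    · push Not at hE
      have hFne : factors n L ≠ [] := by
        intro hc; rw [hc] at hlen; simp at hlen; omega
      obtain ⟨e, F', hcons⟩ := List.exists_cons_of_ne_nil hFne
      rw [hcons]
      simp only [List.foldl_cons]
      rw [stepA_nil_left]
      refine fold_eq F' (fun x hx => hE x (hcons ▸ List.mem_cons_of_mem _ hx)) _ ?_
      exact stepB_ne_nil (by simp) (hE e (hcons ▸ List.mem_cons_self))

theorem get_possible_variants_list_changed : Claim_changed_get_possible_variants_list := by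
  unfold Claim_changed_get_possible_variants_list; decide

theorem get_possible_variants_list_tight : Claim_exact_get_possible_variants_list := by
  unfold Claim_exact_get_possible_variants_list
  intro n L _ hpre hD
  unfold Pre_get_possible_variants_list at hpre
  obtain ⟨i, hiR, hile, hpos⟩ := hD
  rw [List.mem_range] at hiR
  rw [A_eq, B_eq n L hpre]
  rw [if_neg (by omega)]
  have hlen : (factors n L).length = n.toNat := factors_length n L
  have hilt : i < (factors n L).length := by omega
  have hFi : (factors n L)[i]'hilt = [] :=
    (factors_getElem n L i hilt).trans ((range1_eq_nil_iff _).mpr (by omega))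
  have hsplit := take_cons_drop (factors n L) i hilt hFi
  have hB : (factors n L).foldl stepB [[]] = [] := by
    conv_lhs => rw [hsplit]
    rw [List.foldl_append]
    simp only [List.foldl_cons]
    rw [stepB_nil_right, foldB_nil]
  have hRlen : ((factors n L).drop (i+1)).length = n.toNat - (i+1) := by
    rw [List.length_drop]; omega
  have hRne : (factors n L).drop (i+1) ≠ [] := by
    intro hc; rw [hc] at hRlen; simp at hRlen; omega
  have hRall : ∀ el ∈ (factors n L).drop (i+1), el ≠ [] := by
    intro el hel
    obtain ⟨k, hk, hkeq⟩ := List.getElem_of_mem hel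
    have hkF : i+1+k < (factors n L).length := by
      have h2 := hk; rw [List.length_drop] at h2; omega
    have hkeq2 : (factors n L)[i+1+k]'hkF = el := by
      rw [← List.getElem_drop (h := hk)]; exact hkeq
    have hform : el = range1 (L.getD (i+1+k) 0) :=
      hkeq2.symm.trans (factors_getElem n L (i+1+k) hkF)
    rw [hform]
    intro hc
    have hle0 := (range1_eq_nil_iff (L.getD (i+1+k) 0)).mp hc
    have h1 := hpos (i+1+k) (by rw [List.mem_range]; omega) (by omega)
    omega
  have hA : (factors n L).foldl stepA [] ≠ [] := by
    have hAeq : (factors n L).foldl stepA [] = ((factors n L).drop (i+1)).foldl stepA [] := by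
      conv_lhs => rw [hsplit]
      rw [List.foldl_append]
      simp only [List.foldl_cons]
      rw [stepA_nil_right]
    rw [hAeq]
    obtain ⟨e, R', hcons⟩ := List.exists_cons_of_ne_nil hRne
    rw [hcons]
    simp only [List.foldl_cons]
    have he : e ≠ [] := hRall e (hcons ▸ List.mem_cons_self)
    have hstart : stepA [] e ≠ [] := by simp [stepA, he]
    exact foldA_ne_nil R' (fun x hx => hRall x (hcons ▸ List.mem_cons_of_mem _ hx)) _ hstart
  rw [hB]
  exact hA
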